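-- pv_equiv track=rewrite | github.com/matenikoleihsvili060/GOA_homeworks | day32,/claswork32/lesson32.py | show_sequence
-- ===== SOURCE A (Python) =====
-- def show_sequence(n):
--     if n < 0:
--         return str(n) + "<0"
--     elif n == 0:
--         return "0=0"
--     else:
--         series_list = []
--         for i in range(n+1):
--             series_list.append(str(i))
--         series = '+'.join(series_list)
--         total = sum(range(n+1))
--         return series + " = " + str(total)
-- ===== SOURCE B (Python) =====
-- def show_sequence(n):
--     if n < 0:
--         return str(n) + "<0"
--     if n == 0:
--         return "0=0"
--     parts = []
--     k = n
--     while k >= 0: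
--         parts.append(str(k))
--         k -= 1
--     parts.reverse()
--     return "+".join(parts) + " = " + str(n * (n + 1) // 2)
-- ===== Notes on version B (the rewrite author's own statement) =====
-- stated objective: alternative
-- what changed: B replaces A's ascending range loop plus sum() over the range by a descending while-loop that builds the term list back-to-front (then reverses it once) and computes the total with Gauss's closed-form triangular-number formula instead of any summation loop.
import Mathlib
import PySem

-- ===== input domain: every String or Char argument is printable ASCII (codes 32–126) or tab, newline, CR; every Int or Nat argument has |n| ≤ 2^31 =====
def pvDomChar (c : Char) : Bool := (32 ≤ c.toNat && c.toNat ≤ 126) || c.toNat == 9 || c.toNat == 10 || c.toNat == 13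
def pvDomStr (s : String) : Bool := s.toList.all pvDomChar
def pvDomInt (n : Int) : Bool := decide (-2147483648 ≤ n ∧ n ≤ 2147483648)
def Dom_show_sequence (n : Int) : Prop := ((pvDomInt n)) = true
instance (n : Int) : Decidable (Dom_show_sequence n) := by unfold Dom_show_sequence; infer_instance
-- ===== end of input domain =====

-- B builds the term list back-to-front with a countdown loop (then one reverse) and
-- computes the total in closed form via Gauss's n*(n+1)//2; the guard branches are identical.

-- ===== PORT A =====
def show_sequence (n : Int) : String :=
  if n < 0 then PySem.Int.toStr n ++ "<0"
  else if n = 0 then "0=0"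
  else
    let series_list := (PySem.List.pyRange 0 (n+1) 1).foldl
      (fun acc i => acc ++ [PySem.Int.toStr i]) ([] : List String)
    let series := PySem.Str.join "+" series_list
    let total := (PySem.List.pyRange 0 (n+1) 1).foldl (· + ·) (0 : Int)
    series ++ " = " ++ PySem.Int.toStr total

-- ===== PORT B =====
-- B's `while k >= 0: parts.append(str(k)); k -= 1` countdown loop, transcribed as recursion on k
def pvCountdown (k : Int) : List String :=
  if h : 0 ≤ k then PySem.Int.toStr k :: pvCountdown (k - 1) else []
termination_by (k + 1).toNat
decreasing_by omega

def show_sequence_alt (n : Int) : String :=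
  if n < 0 then PySem.Int.toStr n ++ "<0"
  else if n = 0 then "0=0"
  else
    PySem.Str.join "+" (pvCountdown n).reverse ++ " = "
      ++ PySem.Int.toStr (PySem.Int.floordiv (n * (n + 1)) 2)

-- ===== PRECONDITION & SPEC =====
def Spec_show_sequence (n : Int) (out : String) : Prop := out = show_sequence_alt n
instance (n : Int) (out : String) : Decidable (Spec_show_sequence n out) := by unfold Spec_show_sequence; infer_instance

-- ===== CLAIM (what is proved, stated in full; the proofs are below) =====
def Claim_equal_show_sequence : Prop := ∀ (n : Int), Dom_show_sequence n → Spec_show_sequence n (show_sequence n)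

-- ===== LEMMAS AND PROOFS =====

-- A's list-append loop is a map
theorem foldl_push_toStr (l : List Int) (acc : List String) :
    l.foldl (fun acc i => acc ++ [PySem.Int.toStr i]) acc = acc ++ l.map PySem.Int.toStr := by
  induction l generalizing acc with
  | nil => simp
  | cons x xs ih => simp [List.foldl_cons, ih]

-- B's countdown list is the reversed map over range(0, m+1)
theorem countdown_eq (m : Nat) :
    pvCountdown (m : Int) = ((PySem.List.pyRange 0 ((m : Int) + 1) 1).map PySem.Int.toStr).reverse := by
  induction m with
  | zero =>
      rw [pvCountdown]
      rw [show ((0 : Nat) : Int) + 1 = 0 + 1 by norm_num, PySem.List.pyRange_one_singleton]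
      simp [pvCountdown]
  | succ k ih =>
      rw [pvCountdown]
      simp only [show (0 : Int) ≤ ((k + 1 : Nat) : Int) by positivity, dif_pos]
      rw [show ((k + 1 : Nat) : Int) - 1 = (k : Int) by push_cast; ring, ih]
      rw [show ((k + 1 : Nat) : Int) + 1 = ((k : Int) + 1) + 1 by push_cast; ring,
        PySem.List.pyRange_one_succ_right (a := 0) (b := (k : Int) + 1) (by positivity)]
      simp only [List.map_append, List.map_cons, List.map_nil, List.reverse_append,
        List.reverse_cons, List.reverse_nil, List.nil_append, List.cons_append]
      rw [show ((k + 1 : Nat) : Int) = (k : Int) + 1 by push_cast; ring]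

-- A's summation loop equals twice-Gauss
theorem sum_range_gauss (m : Nat) :
    2 * (PySem.List.pyRange 0 ((m : Int) + 1) 1).foldl (· + ·) (0 : Int)
      = (m : Int) * ((m : Int) + 1) := by
  induction m with
  | zero =>
      rw [show ((0 : Nat) : Int) + 1 = 0 + 1 by norm_num, PySem.List.pyRange_one_singleton]
      simp
  | succ k ih =>
      rw [show ((k + 1 : Nat) : Int) = (k : Int) + 1 by push_cast; ring]
      rw [PySem.List.pyRange_one_succ_right (by positivity), List.foldl_append]
      simp only [List.foldl_cons, List.foldl_nil]
      ring_nf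
      ring_nf at ih
      omega

-- ===== VERDICT (by name: the statement is the Claim_ definition above) =====
theorem show_sequence_spec : Claim_equal_show_sequence := by
  intro n _hdom
  unfold Spec_show_sequence show_sequence show_sequence_alt
  by_cases hneg : n < 0
  · simp [hneg]
  · by_cases hz : n = 0
    · simp [hz]
    · simp only [hneg, hz, if_false]
      have hpos : 0 < n := by omega
      obtain ⟨m, hm⟩ : ∃ m : Nat, n = (m : Int) := ⟨n.toNat, by omega⟩
      subst hm
      rw [foldl_push_toStr, countdown_eq, List.reverse_reverse, List.nil_append]
      congr 1
      have h2 := sum_range_gauss m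
      rw [show (m : Int) * ((m : Int) + 1)
            = 2 * ((PySem.List.pyRange 0 ((m : Int) + 1) 1).foldl (· + ·) (0 : Int)) from h2.symm]
      rw [show (2 : Int) * ((PySem.List.pyRange 0 ((m : Int) + 1) 1).foldl (· + ·) (0 : Int))
            = ((PySem.List.pyRange 0 ((m : Int) + 1) 1).foldl (· + ·) (0 : Int)) * 2 by ring]
      rw [PySem.Int.floordiv_eq_ediv_of_pos (by norm_num), Int.mul_ediv_cancel _ (by norm_num)]
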